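-- pv_equiv track=rewrite | github.com/Smarter-Sorting/ai-agentic-retailing-benchmark | test_runner.py | _build_platform_sequences
-- ===== SOURCE A (Python) =====
-- def _build_platform_sequences(scenarios):
--     # Build ordered scenario lists per platform to avoid cross-platform blocking.
--     platform_sequences = {}
--     for scenario_id in sorted(scenarios.keys()):
--         platforms = scenarios[scenario_id]
--         for platform_id in sorted(platforms.keys()):
--             platform_sequences.setdefault(platform_id, [])
--             platform_sequences[platform_id].append((scenario_id, platforms[platform_id]))
--     return platform_sequences
-- ===== SOURCE B (Python) =====
-- def _build_platform_sequences(scenarios):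
--     # Two-phase inversion: first compute the platform order (first appearance over
--     # sorted scenarios, sorted platform keys), then gather each platform's ordered
--     # sequence by a dedicated scan over the sorted scenario ids.
--     scenario_ids = sorted(scenarios.keys())
--     order = []
--     for scenario_id in scenario_ids:
--         for platform_id in sorted(scenarios[scenario_id].keys()):
--             if platform_id not in order:
--                 order.append(platform_id)
--     return {
--         platform_id: [(scenario_id, scenarios[scenario_id][platform_id])
--                       for scenario_id in scenario_ids
--                       if platform_id in scenarios[scenario_id]]
--         for platform_id in order
--     }
-- ===== Notes on version B (the rewrite author's own statement) =====
-- stated objective: alternative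
-- what changed: Replaces the single grouping pass that grows per-platform lists via setdefault/append with a two-phase inversion: first compute the platform order, then build each platform's sequence by a dedicated comprehension scan over the sorted scenario ids with a membership test.
import Mathlib
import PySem

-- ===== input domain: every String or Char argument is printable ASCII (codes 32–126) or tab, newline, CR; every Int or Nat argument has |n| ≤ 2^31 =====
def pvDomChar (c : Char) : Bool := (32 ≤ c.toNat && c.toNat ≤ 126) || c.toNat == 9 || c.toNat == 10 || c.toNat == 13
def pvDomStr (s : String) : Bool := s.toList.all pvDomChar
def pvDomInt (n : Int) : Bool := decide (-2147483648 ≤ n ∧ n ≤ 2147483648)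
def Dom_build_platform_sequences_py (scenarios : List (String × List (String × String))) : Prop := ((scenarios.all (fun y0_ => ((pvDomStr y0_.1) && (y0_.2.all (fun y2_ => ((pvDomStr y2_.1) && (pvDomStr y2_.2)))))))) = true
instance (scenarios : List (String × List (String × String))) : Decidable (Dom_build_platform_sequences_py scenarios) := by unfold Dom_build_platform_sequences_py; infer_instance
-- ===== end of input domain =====

-- B replaces A's single setdefault/append grouping pass by a two-phase inversion
-- (compute the platform order first, then gather each platform's sequence by a
-- dedicated scan); objective: alternative decomposition, same exact result.

-- ===== PORT A =====
-- Transliteration of _build_platform_sequences.  scenarios[scenario_id] /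
-- platforms[platform_id] are ported as getD with a default; this is exact
-- because the keys come from .keys of the very same dict (no KeyError).
def build_platform_sequences_py (scenarios : List (String × List (String × String))) : List (String × List (String × String)) :=
  let scen : PySem.Dict String (List (String × String)) := PySem.Dict.mk scenarios
  let res : PySem.Dict String (List (String × String)) :=
    (PySem.List.sorted scen.keys (fun x => x) false).foldl (fun acc sid =>
      let platforms : PySem.Dict String String := PySem.Dict.mk (scen.getD sid [])
      (PySem.List.sorted platforms.keys (fun x => x) false).foldl (fun acc pid =>
        -- platform_sequences.setdefault(platform_id, []); platform_sequences[platform_id].append(...)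
        (acc.setdefault pid []).modify pid [] (fun l => l ++ [(sid, platforms.getD pid "")])) acc)
      PySem.Dict.empty
  res.items

-- ===== PORT B =====
-- Transliteration of Source B: build `order` (first-occurrence platform ids), then a
-- dict comprehension whose value for each platform is a filtering scan of the
-- sorted scenario ids.  Lookups are getD with a default, exact as in port A.
def build_platform_sequences_py_alt (scenarios : List (String × List (String × String))) : List (String × List (String × String)) :=
  let scen : PySem.Dict String (List (String × String)) := PySem.Dict.mk scenarios
  let sids := PySem.List.sorted scen.keys (fun x => x) false
  let order : PySem.Set String :=
    sids.foldl (fun ord sid =>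
      (PySem.List.sorted (PySem.Dict.mk (scen.getD sid [])).keys (fun x => x) false).foldl
        (fun ord pid => PySem.Set.add ord pid) ord) PySem.Set.empty
  let res : PySem.Dict String (List (String × String)) :=
    order.foldl (fun d pid =>
      d.insert pid (sids.filterMap (fun sid =>
        let platforms : PySem.Dict String String := PySem.Dict.mk (scen.getD sid [])
        if platforms.contains pid then some (sid, platforms.getD pid "") else none))) PySem.Dict.empty
  res.items

-- ===== PRECONDITION & SPEC =====
-- Pre_: every inner association list has distinct keys.  A Python dict cannot
-- hold duplicate keys, so this excludes no input the Python function accepts;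
-- it only pins down the assoc-list representation of the dict arguments.
def Pre_build_platform_sequences_py (scenarios : List (String × List (String × String))) : Prop :=
  ∀ p ∈ scenarios, (p.2.map Prod.fst).Nodup
instance (scenarios : List (String × List (String × String))) : Decidable (Pre_build_platform_sequences_py scenarios) := by unfold Pre_build_platform_sequences_py; infer_instance

def pvWitness_build_platform_sequences_py : (List (String × List (String × String))) :=
  [("s2", [("p1", "a"), ("p2", "b")]), ("s1", [("p2", "c")])]

def Spec_build_platform_sequences_py (scenarios : List (String × List (String × String))) (out : List (String × List (String × String))) : Prop := out = build_platform_sequences_py_alt scenarios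
instance (scenarios : List (String × List (String × String))) (out : List (String × List (String × String))) : Decidable (Spec_build_platform_sequences_py scenarios out) := by unfold Spec_build_platform_sequences_py; infer_instance

-- ===== CLAIM (what is proved, stated in full; the proofs are below) =====
def Claim_equal_build_platform_sequences_py : Prop := ∀ (scenarios : List (String × List (String × String))), Dom_build_platform_sequences_py scenarios → Pre_build_platform_sequences_py scenarios → Spec_build_platform_sequences_py scenarios (build_platform_sequences_py scenarios)

-- ===== LEMMAS AND PROOFS =====

-- the per-scenario platform dict, its sorted key list, and the flattened pair list
def pvPl (scen : PySem.Dict String (List (String × String))) (sid : String) : PySem.Dict String String :=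
  PySem.Dict.mk (scen.getD sid [])
def pvPids (scen : PySem.Dict String (List (String × String))) (sid : String) : List String :=
  PySem.List.sorted (pvPl scen sid).keys (fun x => x) false
def pvFlat (scen : PySem.Dict String (List (String × String))) (sids : List String) : List (String × (String × String)) :=
  sids.flatMap (fun sid => (pvPids scen sid).map (fun pid => (pid, (sid, (pvPl scen sid).getD pid ""))))

theorem pv_setdefault_modify (d : PySem.Dict String (List (String × String))) (k : String)
    (f : List (String × String) → List (String × String)) :
    (d.setdefault k []).modify k [] f = d.modify k [] f := by
  by_cases h : d.contains k
  · unfold PySem.Dict.setdefault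
    rw [if_pos h]
  · have hall : ∀ p ∈ d.items, p.1 ≠ k := by
      intro p hp hk
      apply h
      simp only [PySem.Dict.contains, List.any_eq_true]
      exact ⟨p, hp, by simp [hk]⟩
    have hany : (d.items.any fun p => p.1 == k) = false :=
      List.any_eq_false.mpr (fun p hp => by simp [hall p hp])
    have hfind : List.find? (fun p => p.1 == k) d.items = none :=
      List.find?_eq_none.mpr (fun p hp => by simp [hall p hp])
    have hmap : List.map (fun p => if p.1 = k then (k, f []) else p) d.items = d.items := by
      have hm : List.map (fun p => if p.1 = k then (k, f []) else p) d.items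
          = List.map id d.items :=
        List.map_congr_left (fun p hp => by simp [hall p hp])
      simpa using hm
    unfold PySem.Dict.setdefault
    rw [if_neg h]
    unfold PySem.Dict.modify PySem.Dict.insert PySem.Dict.getD PySem.Dict.get? PySem.Dict.contains
    simp [List.find?_append, hfind, List.any_append, hany, hmap]

theorem pv_nodup_filter_eq (ks : List String) (h : ks.Nodup) (pid : String) :
    ks.filter (fun k => k == pid) = if pid ∈ ks then [pid] else [] := by
  induction ks with
  | nil => simp
  | cons a t ih =>
    simp only [List.nodup_cons] at h
    by_cases ha : a = pid
    · subst ha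
      have ht : t.filter (fun k => k == a) = [] := by
        apply List.filter_eq_nil_iff.mpr; intro x hx; simp; rintro rfl; exact h.1 hx
      simp [ht]
    · simp [ha, ih h.2, Ne.symm ha]

theorem pv_inner_nodup (scenarios : List (String × List (String × String)))
    (hpre : Pre_build_platform_sequences_py scenarios) (sid : String) :
    ((PySem.Dict.mk scenarios).getD sid [] |>.map Prod.fst).Nodup := by
  induction scenarios with
  | nil => simp [PySem.Dict.getD, PySem.Dict.get?]
  | cons p t ih =>
    obtain ⟨k, v⟩ := p
    rw [PySem.Dict.getD, PySem.Dict.get?_mk_cons]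
    by_cases hk : (k == sid)
    · simpa [hk] using hpre (k, v) (by simp)
    · simp only [hk, Bool.false_eq_true]
      exact ih (fun q hq => hpre q (by simp [hq]))

theorem pv_seq_eq (scen : PySem.Dict String (List (String × String))) (pid : String)
    (sids : List String) (h : ∀ sid, ((pvPl scen sid).keys).Nodup) :
    sids.filterMap (fun sid =>
        if (pvPl scen sid).contains pid then some (sid, (pvPl scen sid).getD pid "") else none)
      = ((pvFlat scen sids).filter (fun p => p.1 == pid)).map (fun p => p.2) := by
  induction sids with
  | nil => simp [pvFlat]
  | cons sid t ih =>
    rw [List.filterMap_cons]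
    have hnd : (pvPids scen sid).Nodup :=
      ((PySem.List.sorted_perm _ _ _).nodup_iff).mpr (h sid)
    have hmem : pid ∈ pvPids scen sid ↔ (pvPl scen sid).contains pid = true := by
      rw [pvPids, PySem.List.mem_sorted]
      exact (PySem.Dict.contains_iff_mem_keys _ _).symm
    have hhead : (((pvPids scen sid).map (fun k => (k, (sid, (pvPl scen sid).getD k "")))).filter
          (fun p => p.1 == pid)).map (fun p => p.2)
        = if (pvPl scen sid).contains pid then [(sid, (pvPl scen sid).getD pid "")] else [] := by
      rw [List.filter_map]
      have : ((fun p => p.1 == pid) ∘ (fun k => (k, (sid, (pvPl scen sid).getD k "")))) = (fun k => k == pid) := by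
        funext k; simp
      rw [this, pv_nodup_filter_eq _ hnd pid]
      by_cases hp : pid ∈ pvPids scen sid
      · simp [hp, hmem.mp hp]
      · have : (pvPl scen sid).contains pid = false := by
          rw [← Bool.not_eq_true]; exact fun hc => hp (hmem.mpr hc)
        simp [hp, this]
    rw [pvFlat, List.flatMap_cons, List.filter_append, List.map_append, ← pvFlat, hhead, ← ih]
    by_cases hc : (pvPl scen sid).contains pid <;> simp [hc]

theorem pv_A_reduce (scenarios : List (String × List (String × String))) :
    build_platform_sequences_py scenarios
      = ((pvFlat (PySem.Dict.mk scenarios)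
            (PySem.List.sorted (PySem.Dict.mk scenarios).keys (fun x => x) false)).foldl
          (fun d p => d.modify p.1 [] (fun l => l ++ [p.2])) PySem.Dict.empty).items := by
  unfold build_platform_sequences_py pvFlat pvPids pvPl
  rw [List.foldl_flatMap]
  simp only [List.foldl_map, pv_setdefault_modify]

theorem pv_B_reduce (scenarios : List (String × List (String × String))) :
    build_platform_sequences_py_alt scenarios
      = ((PySem.Set.ofList ((pvFlat (PySem.Dict.mk scenarios)
              (PySem.List.sorted (PySem.Dict.mk scenarios).keys (fun x => x) false)).map Prod.fst)).foldl
          (fun d pid =>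
            d.insert pid ((PySem.List.sorted (PySem.Dict.mk scenarios).keys (fun x => x) false).filterMap
              (fun sid => if (pvPl (PySem.Dict.mk scenarios) sid).contains pid
                then some (sid, (pvPl (PySem.Dict.mk scenarios) sid).getD pid "") else none)))
          PySem.Dict.empty).items := by
  unfold build_platform_sequences_py_alt pvFlat pvPids pvPl
  rw [PySem.Set.ofList_eq_foldl, List.foldl_map, List.foldl_flatMap]
  simp only [List.foldl_map, PySem.Set.empty]


-- ===== VERDICT (by name: the statement is the Claim_ definition above) =====
theorem build_platform_sequences_py_spec : Claim_equal_build_platform_sequences_py := by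
  intro scenarios _ hpre
  unfold Spec_build_platform_sequences_py
  rw [pv_A_reduce, pv_B_reduce]
  have hnd : ∀ sid, ((pvPl (PySem.Dict.mk scenarios) sid).keys).Nodup := by
    intro sid
    rw [pvPl, PySem.Dict.keys_mk]
    exact pv_inner_nodup scenarios hpre sid
  have hknd : ((pvFlat (PySem.Dict.mk scenarios)
        (PySem.List.sorted (PySem.Dict.mk scenarios).keys (fun x => x) false)).foldl
          (fun d p => d.modify p.1 [] (fun l => l ++ [p.2])) PySem.Dict.empty).keys.Nodup :=
    PySem.Dict.nodup_keys_foldl_modify_key _ Prod.fst [] (fun _ x v => v ++ [x.2]) _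
      (by simp [PySem.Dict.keys_empty])
  rw [PySem.Dict.items_eq_map_keys _ hknd [], PySem.Dict.keys_foldl_modify_key,
    PySem.Dict.items_foldl_insert_fresh _ (fun pid => pid) _ _
      (fun a _ => PySem.Dict.contains_empty a)
      (by simpa using PySem.Set.nodup_ofList ((pvFlat (PySem.Dict.mk scenarios)
        (PySem.List.sorted (PySem.Dict.mk scenarios).keys (fun x => x) false)).map Prod.fst))]
  have hupd : PySem.Set.update (PySem.Dict.empty : PySem.Dict String (List (String × String))).keys
      ((pvFlat (PySem.Dict.mk scenarios)
        (PySem.List.sorted (PySem.Dict.mk scenarios).keys (fun x => x) false)).map Prod.fst)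
      = PySem.Set.ofList ((pvFlat (PySem.Dict.mk scenarios)
        (PySem.List.sorted (PySem.Dict.mk scenarios).keys (fun x => x) false)).map Prod.fst) := by
    rw [PySem.Set.ofList_eq_foldl]; rfl
  rw [hupd]
  simp only [PySem.Dict.empty, List.nil_append]
  apply List.map_congr_left
  intro k _
  rw [PySem.Dict.getD_foldl_modify_append,
    ← pv_seq_eq (PySem.Dict.mk scenarios) k _ hnd]
  simp [PySem.Dict.getD, PySem.Dict.get?]
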